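-- pv_equiv track=rewrite | github.com/sejeonglee/ps | 2022SKTTworX/2번.py | solution
-- ===== SOURCE A (Python) =====
-- from enum import Enum
--
-- class Payment(Enum):
--     OVER90 = 1
--     OVER60 = 2
--     OVER48 = 3
--     OVER36 = 4
--     DEFAULT = 0
--
-- class Period(Enum):
--     OVER5 = 1
--     OVER2 = 2
--     DEFAULT = 0
--
-- def solution(periods, payments, estimates):
--     def determine_period(period):
--         if period < 24:
--             return Period.DEFAULT
--         elif period < 60:
--             return Period.OVER2
--         elif period >= 60:
--             return Period.OVER5
--
--     def determine_payment(annual_payment):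
--         if annual_payment < 360000:
--             return Payment.DEFAULT
--         elif annual_payment < 480000:
--             return Payment.OVER36
--         elif annual_payment < 600000:
--             return Payment.OVER48
--         elif annual_payment < 900000:
--             return Payment.OVER60
--         elif annual_payment >= 900000:
--             return Payment.OVER90
--
--     def grade_decision(period_category: Period, payment_category: Payment):
--         decision_dict = {
--             Payment.OVER90: {
--                 Period.DEFAULT: "GOLD",
--                 Period.OVER2: "VIP",
--                 Period.OVER5: "VIP",
--             },
--             Payment.OVER60: {
--                 Period.DEFAULT: "GOLD",
--                 Period.OVER2: "GOLD",
--                 Period.OVER5: "VIP",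
--             },
--             Payment.OVER48: {
--                 Period.DEFAULT: "SILVER",
--                 Period.OVER2: "GOLD",
--                 Period.OVER5: "GOLD",
--             },
--             Payment.OVER36: {
--                 Period.DEFAULT: "SILVER",
--                 Period.OVER2: "SILVER",
--                 Period.OVER5: "GOLD",
--             },
--             Payment.DEFAULT: {
--                 Period.DEFAULT: "SILVER",
--                 Period.OVER2: "SILVER",
--                 Period.OVER5: "SILVER",
--             },
--         }
--         return decision_dict[payment_category][period_category]
--
--     rise_n = 0
--     fall_n = 0
--
--     for period, payment, estimate in zip(periods, payments, estimates):
--         # current grade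
--         period_category = determine_period(period)
--         payment_category = determine_payment(sum(payment))
--         current_grade = grade_decision(period_category, payment_category)
--
--         # next grade
--         period_category = determine_period(period + 1)
--         payment_category = determine_payment(sum(payment[1:], estimate))
--         next_grade = grade_decision(period_category, payment_category)
--
--         if current_grade != "VIP" and next_grade == "VIP":
--             rise_n += 1
--         elif current_grade == "VIP" and next_grade != "VIP":
--             fall_n += 1
--
--     return [rise_n, fall_n]
-- ===== SOURCE B (Python) =====
-- def solution(periods, payments, estimates):
--     # Loyalty score: one point per crossed payment threshold plus one per crossed
--     # period threshold; the grade table is equivalent to "VIP iff score >= 5".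
--     def score(period, total):
--         pts = sum(1 for t in (360000, 480000, 600000, 900000) if t <= total)
--         return pts + (period >= 24) + (period >= 60)
--     scores = [(score(p, sum(pay)), score(p + 1, sum(pay[1:], e)))
--               for p, pay, e in zip(periods, payments, estimates)]
--     rise_n = sum(1 for c, n in scores if c < 5 <= n)
--     fall_n = sum(1 for c, n in scores if n < 5 <= c)
--     return [rise_n, fall_n]
-- ===== Notes on version B (the rewrite author's own statement) =====
-- stated objective: alternative
-- what changed: Replaced the enum/table classification and accumulator loop by an additive loyalty score (one point per crossed payment/period threshold, VIP iff score >= 5) and a staged pipeline: first build the list of (current,next) score pairs, then count rises and falls by filtering it.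
import Mathlib
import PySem

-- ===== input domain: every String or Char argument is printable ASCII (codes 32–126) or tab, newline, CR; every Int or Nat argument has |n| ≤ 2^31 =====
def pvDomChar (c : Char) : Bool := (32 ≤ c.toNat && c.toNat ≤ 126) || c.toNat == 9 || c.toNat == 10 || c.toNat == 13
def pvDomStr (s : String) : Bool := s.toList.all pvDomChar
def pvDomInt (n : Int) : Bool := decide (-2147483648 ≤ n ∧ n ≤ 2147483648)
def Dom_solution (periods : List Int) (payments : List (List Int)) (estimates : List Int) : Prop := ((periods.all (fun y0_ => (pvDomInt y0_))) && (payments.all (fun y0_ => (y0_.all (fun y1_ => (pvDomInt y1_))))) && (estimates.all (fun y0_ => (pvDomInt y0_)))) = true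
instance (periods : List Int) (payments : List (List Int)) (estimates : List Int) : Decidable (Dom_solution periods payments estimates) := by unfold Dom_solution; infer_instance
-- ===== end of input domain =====

-- B replaces the enum/table classification and accumulator loop by an additive
-- threshold score (VIP iff score >= 5) and a staged build-pairs-then-count pipeline.

-- ===== PORT A =====
inductive PvPayment | OVER90 | OVER60 | OVER48 | OVER36 | DEFAULT
deriving DecidableEq, Repr

inductive PvPeriod | OVER5 | OVER2 | DEFAULT
deriving DecidableEq, Repr

def determinePeriod (period : Int) : PvPeriod :=
  if period < 24 then .DEFAULT
  else if period < 60 then .OVER2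
  else .OVER5

def determinePayment (annual_payment : Int) : PvPayment :=
  if annual_payment < 360000 then .DEFAULT
  else if annual_payment < 480000 then .OVER36
  else if annual_payment < 600000 then .OVER48
  else if annual_payment < 900000 then .OVER60
  else .OVER90

-- the nested decision dict, as a total lookup table
def gradeDecision : PvPayment → PvPeriod → String
  | .OVER90, .DEFAULT => "GOLD"
  | .OVER90, .OVER2 => "VIP"
  | .OVER90, .OVER5 => "VIP"
  | .OVER60, .DEFAULT => "GOLD"
  | .OVER60, .OVER2 => "GOLD"
  | .OVER60, .OVER5 => "VIP"
  | .OVER48, .DEFAULT => "SILVER"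
  | .OVER48, .OVER2 => "GOLD"
  | .OVER48, .OVER5 => "GOLD"
  | .OVER36, .DEFAULT => "SILVER"
  | .OVER36, .OVER2 => "SILVER"
  | .OVER36, .OVER5 => "GOLD"
  | .DEFAULT, .DEFAULT => "SILVER"
  | .DEFAULT, .OVER2 => "SILVER"
  | .DEFAULT, .OVER5 => "SILVER"

def solutionLoop : List (Int × List Int × Int) → Int → Int → Int × Int
  | [], rise_n, fall_n => (rise_n, fall_n)
  | (period, payment, estimate) :: rest, rise_n, fall_n =>
    let current_grade := gradeDecision (determinePayment (payment.foldl (· + ·) 0)) (determinePeriod period)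
    let next_grade := gradeDecision (determinePayment ((payment.drop 1).foldl (· + ·) estimate)) (determinePeriod (period + 1))
    if current_grade ≠ "VIP" ∧ next_grade = "VIP" then solutionLoop rest (rise_n + 1) fall_n
    else if current_grade = "VIP" ∧ next_grade ≠ "VIP" then solutionLoop rest rise_n (fall_n + 1)
    else solutionLoop rest rise_n fall_n

def solution (periods : List Int) (payments : List (List Int)) (estimates : List Int) : List Int :=
  let (rise_n, fall_n) := solutionLoop (periods.zip (payments.zip estimates)) 0 0
  [rise_n, fall_n]

-- ===== PORT B =====
def pvScore (period total : Int) : Int :=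
  ([360000, 480000, 600000, 900000].foldl
      (fun acc t => acc + (if t ≤ total then 1 else 0)) 0)
    + (if period ≥ 24 then 1 else 0) + (if period ≥ 60 then 1 else 0)

def pvScorePair (x : Int × List Int × Int) : Int × Int :=
  (pvScore x.1 (x.2.1.foldl (· + ·) 0),
   pvScore (x.1 + 1) ((x.2.1.drop 1).foldl (· + ·) x.2.2))

def solution_alt (periods : List Int) (payments : List (List Int)) (estimates : List Int) : List Int :=
  let scores := (periods.zip (payments.zip estimates)).map pvScorePair
  let rise_n : Int := (scores.filter (fun cn => cn.1 < 5 && 5 ≤ cn.2)).length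
  let fall_n : Int := (scores.filter (fun cn => cn.2 < 5 && 5 ≤ cn.1)).length
  [rise_n, fall_n]

-- ===== PRECONDITION & SPEC =====
def Spec_solution (periods : List Int) (payments : List (List Int)) (estimates : List Int) (out : List Int) : Prop := out = solution_alt periods payments estimates
instance (periods : List Int) (payments : List (List Int)) (estimates : List Int) (out : List Int) : Decidable (Spec_solution periods payments estimates out) := by unfold Spec_solution; infer_instance

-- ===== CLAIM (what is proved, stated in full; the proofs are below) =====
def Claim_equal_solution : Prop := ∀ (periods : List Int) (payments : List (List Int)) (estimates : List Int), Dom_solution periods payments estimates → Spec_solution periods payments estimates (solution periods payments estimates)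

-- ===== LEMMAS AND PROOFS =====

lemma grade_vip_iff (p t : Int) :
    (gradeDecision (determinePayment t) (determinePeriod p) = "VIP") ↔ (5 ≤ pvScore p t) := by
  unfold gradeDecision determinePayment determinePeriod pvScore
  simp only [List.foldl]
  split_ifs <;> simp <;> omega

lemma loop_eq (l : List (Int × List Int × Int)) (r f : Int) :
    solutionLoop l r f =
      (r + ((l.map pvScorePair).filter (fun cn => cn.1 < 5 && 5 ≤ cn.2)).length,
       f + ((l.map pvScorePair).filter (fun cn => cn.2 < 5 && 5 ≤ cn.1)).length) := by
  induction l generalizing r f with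
  | nil => simp [solutionLoop]
  | cons hd rest ih =>
    obtain ⟨p, pay, e⟩ := hd
    have hc := grade_vip_iff p (pay.foldl (· + ·) 0)
    have hn := grade_vip_iff (p + 1) ((pay.drop 1).foldl (· + ·) e)
    simp only [List.drop_one] at hn
    simp only [solutionLoop, List.map_cons, List.filter_cons, pvScorePair, List.drop_one]
    by_cases h1 : 5 ≤ pvScore p (pay.foldl (· + ·) 0) <;>
      by_cases h2 : 5 ≤ pvScore (p + 1) (pay.tail.foldl (· + ·) e)
    · -- both VIP
      rw [if_neg (by rintro ⟨hv, -⟩; exact hv (hc.mpr h1)),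
          if_neg (by rintro ⟨-, hv⟩; exact hv (hn.mpr h2))]
      rw [ih]
      have b1 : ¬ (pvScore p (pay.foldl (· + ·) 0) < 5) := by omega
      have b2 : ¬ (pvScore (p + 1) (pay.tail.foldl (· + ·) e) < 5) := by omega
      simp [b1, b2]
    · -- fall
      rw [if_neg (by rintro ⟨hv, -⟩; exact hv (hc.mpr h1)),
          if_pos ⟨hc.mpr h1, fun hv => h2 (hn.mp hv)⟩]
      rw [ih]
      have b1 : ¬ (pvScore p (pay.foldl (· + ·) 0) < 5) := by omega
      have b2 : pvScore (p + 1) (pay.tail.foldl (· + ·) e) < 5 := by omega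
      simp [b1, b2, h1, Prod.mk.injEq]; omega
    · -- rise
      rw [if_pos ⟨fun hv => h1 (hc.mp hv), hn.mpr h2⟩]
      rw [ih]
      have b1 : pvScore p (pay.foldl (· + ·) 0) < 5 := by omega
      have b2 : ¬ (pvScore (p + 1) (pay.tail.foldl (· + ·) e) < 5) := by omega
      simp [b1, b2, h2, Prod.mk.injEq]; omega
    · -- neither
      rw [if_neg (by rintro ⟨-, hv⟩; exact h2 (hn.mp hv)),
          if_neg (by rintro ⟨hv, -⟩; exact h1 (hc.mp hv))]
      rw [ih]
      simp [h1, h2]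

-- ===== VERDICT (by name: the statement is the Claim_ definition above) =====
theorem solution_spec : Claim_equal_solution := by
  intro periods payments estimates _
  unfold Spec_solution solution solution_alt
  rw [loop_eq]
  simp
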